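-- pv_equiv track=rewrite | github.com/monkeykinggggg/WFiIS_AGH_Python_Basics | lab07/tasks_solutions.py | gen2
-- ===== SOURCE A (Python) =====
-- def gen2(seq):
--
--     def doskonala(liczba):
--         if isinstance(liczba,int) and liczba > 0:
--             suma = sum([kandydat for kandydat in range(1,liczba) if liczba%kandydat==0])
--             if suma == liczba:
--                 return True
--         return False
--
--     yield from filter(doskonala,seq)
-- ===== SOURCE B (Python) =====
-- def gen2(seq):
--
--     def doskonala(liczba):
--         # divisor-pair sum: iterate i up to sqrt(liczba), add i and liczba//i
--         if not (isinstance(liczba, int) and liczba > 0):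
--             return False
--         if liczba == 1:
--             return False
--         s = 1
--         i = 2
--         while i * i <= liczba:
--             if liczba % i == 0:
--                 j = liczba // i
--                 if j != i:
--                     s = s + i + j
--                 else:
--                     s = s + i
--             i += 1
--         return s == liczba
--
--     yield from filter(doskonala, seq)
-- ===== Notes on version B (the rewrite author's own statement) =====
-- stated objective: faster
-- what changed: per-element perfect-number test replaced: instead of summing all k in range(1,n) with n%k==0, B sums divisor pairs (i, n//i) for i up to sqrt(n) starting from 1.
import Mathlib
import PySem

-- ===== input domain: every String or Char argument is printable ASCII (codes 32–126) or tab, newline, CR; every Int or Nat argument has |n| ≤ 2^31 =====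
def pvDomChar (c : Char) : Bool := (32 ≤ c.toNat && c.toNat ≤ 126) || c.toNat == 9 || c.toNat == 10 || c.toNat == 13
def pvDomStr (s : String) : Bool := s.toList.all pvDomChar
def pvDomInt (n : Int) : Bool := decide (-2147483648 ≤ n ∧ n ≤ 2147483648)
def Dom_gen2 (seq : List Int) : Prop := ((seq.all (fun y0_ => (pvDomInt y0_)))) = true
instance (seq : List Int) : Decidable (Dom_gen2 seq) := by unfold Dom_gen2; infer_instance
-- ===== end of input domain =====

-- B replaces A's per-element scan of all k in range(1, n) by a divisor-pair sum over i with i*i <= n; same output list, proved equal for all inputs.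


-- ===== PORT A =====
-- A's inner helper doskonala: sum every kandydat in range(1, liczba) with liczba % kandydat == 0, compare with liczba.
def pvDoskonala (liczba : Int) : Bool :=
  if liczba > 0 then
    let suma : Int :=
      ((PySem.List.pyRange 1 liczba 1).filter
        (fun kandydat => PySem.Int.mod liczba kandydat == 0)).sum
    suma == liczba
  else false

def gen2 (seq : List Int) : List Int := seq.filter pvDoskonala

-- ===== PORT B =====
-- B's while loop: i runs while i * i <= liczba, adding the divisor pair (i, liczba // i) to the accumulator s.
def pvAltLoop (liczba i s : Int) : Int :=
  if i * i ≤ liczba then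
    pvAltLoop liczba (i + 1)
      (if PySem.Int.mod liczba i == 0 then
        (let j := PySem.Int.floordiv liczba i
         if j != i then s + i + j else s + i)
       else s)
  else s
termination_by (liczba + 1 - i).toNat
decreasing_by
  rename_i h
  have hin : i ≤ liczba := by nlinarith [sq_nonneg i, sq_nonneg (i - 1)]
  omega

def pvIsPerfectAlt (liczba : Int) : Bool :=
  if liczba > 0 then
    if liczba == 1 then false
    else pvAltLoop liczba 2 1 == liczba
  else false

def gen2_alt (seq : List Int) : List Int := seq.filter pvIsPerfectAlt

-- ===== PRECONDITION & SPEC =====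
def Spec_gen2 (seq : List Int) (out : List Int) : Prop := out = gen2_alt seq
instance (seq : List Int) (out : List Int) : Decidable (Spec_gen2 seq out) := by unfold Spec_gen2; infer_instance

-- ===== CLAIM (what is proved, stated in full; the proofs are below) =====
def Claim_equal_gen2 : Prop := ∀ (seq : List Int), Dom_gen2 seq → Spec_gen2 seq (gen2 seq)

-- ===== LEMMAS AND PROOFS =====

-- what B's loop still has to add for the divisor d of m once the counter stands at i
def pvF (m i d : Nat) : Nat :=
  (if i ≤ d ∧ d * d ≤ m then d else 0) + (if m < d * d ∧ d * i ≤ m then d else 0)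

-- past the square root nothing remains to add
lemma pvF_base {m i : ℕ} (hii : m < i * i) {d : ℕ} (hd : d ∣ m) (hm : 1 ≤ m) :
    pvF m i d = 0 := by
  have hd0 : 0 < d := Nat.pos_of_dvd_of_pos hd hm
  have h1 : ¬ (i ≤ d ∧ d * d ≤ m) := by rintro ⟨a, b⟩; nlinarith
  have h2 : ¬ (m < d * d ∧ d * i ≤ m) := by
    rintro ⟨a, b⟩
    rcases Nat.lt_or_ge d i with h | h
    · nlinarith
    · nlinarith
  simp [pvF, h1, h2]

-- a counter step at a non-matching i leaves each divisor's remaining contribution unchanged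
lemma pvF_succ {m i d : ℕ} (hm : 1 ≤ m) (hd : d ∣ m) (hdi : d ≠ i)
    (hdim : d * i ≠ m) : pvF m i d = pvF m (i + 1) d := by
  have hd0 : 0 < d := Nat.pos_of_dvd_of_pos hd hm
  have e1 : (i ≤ d ∧ d * d ≤ m) ↔ (i + 1 ≤ d ∧ d * d ≤ m) := by
    constructor
    · rintro ⟨a, b⟩; exact ⟨by omega, b⟩
    · rintro ⟨a, b⟩; exact ⟨by omega, b⟩
  have e2 : (m < d * d ∧ d * i ≤ m) ↔ (m < d * d ∧ d * (i + 1) ≤ m) := by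
    constructor
    · rintro ⟨a, b⟩
      refine ⟨a, ?_⟩
      by_contra hcon
      obtain ⟨e, he⟩ := hd
      have he' : e = i := by
        subst he
        have hb : i ≤ e := Nat.le_of_mul_le_mul_left (by linarith [mul_comm d e, mul_comm d i]) hd0
        have hb2 : e < i + 1 := by
          by_contra h3
          push Not at hcon h3
          have : d * (i + 1) ≤ d * e := Nat.mul_le_mul_left d h3
          omega
        omega
      exact hdim (by rw [he, he', mul_comm])
    · rintro ⟨a, b⟩
      exact ⟨a, le_trans (Nat.mul_le_mul_left d (by omega)) b⟩
  simp only [pvF]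
  rw [if_congr e1 rfl rfl, if_congr e2 rfl rfl]

-- one loop step extracts exactly the contribution Python's body adds at counter i
lemma pvF_step {m i : ℕ} (hm : 1 ≤ m) (hi : 1 ≤ i) (hii : i * i ≤ m) :
    (∑ d ∈ m.divisors, pvF m i d)
      = (if m % i = 0 then i + (if m / i ≠ i then m / i else 0) else 0)
        + ∑ d ∈ m.divisors, pvF m (i + 1) d := by
  have hm0 : m ≠ 0 := by omega
  have hi0 : 0 < i := hi
  by_cases hdvd : i ∣ m
  · obtain ⟨c, hc⟩ := hdvd
    have hc0 : 0 < c := by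
      rcases Nat.eq_zero_or_pos c with h | h
      · subst h; omega
      · exact h
    have hdivc : m / i = c := by rw [hc]; exact Nat.mul_div_cancel_left c hi0
    have hmod : m % i = 0 := Nat.dvd_iff_mod_eq_zero.mp ⟨c, hc⟩
    have hic : i ≤ c := by
      have : i * i ≤ i * c := by omega
      exact Nat.le_of_mul_le_mul_left this hi0
    have key : ∀ d ∈ m.divisors, pvF m i d
        = ((if d = i then i else 0) + (if d = c ∧ c ≠ i then c else 0)) + pvF m (i + 1) d := by
      intro d hdm
      have hd : d ∣ m := (Nat.mem_divisors.mp hdm).1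
      have hd0 : 0 < d := Nat.pos_of_dvd_of_pos hd hm
      by_cases hdi : d = i
      · subst hdi
        have hne : ¬ (d = c ∧ c ≠ d) := by rintro ⟨rfl, hx⟩; exact hx rfl
        have h2 : ¬ m < d * d := by omega
        simp [pvF, hii, hne, h2]
      · by_cases hdc : d = c ∧ c ≠ i
        · obtain ⟨rfl, hci⟩ := hdc
          have hlt : i < d := lt_of_le_of_ne hic (Ne.symm hci)
          have hdd : m < d * d := by
            calc m = i * d := hc
            _ < d * d := (Nat.mul_lt_mul_right hd0).mpr hlt
          have ha : ¬ (i ≤ d ∧ d * d ≤ m) := by omega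
          have hb : m < d * d ∧ d * i ≤ m := ⟨hdd, by rw [hc, mul_comm]⟩
          have hc' : ¬ (i + 1 ≤ d ∧ d * d ≤ m) := by omega
          have hd' : ¬ (m < d * d ∧ d * (i + 1) ≤ m) := by
            rintro ⟨_, hx⟩
            have : d * (i + 1) = m + d := by rw [Nat.mul_succ, mul_comm d i, ← hc]
            omega
          simp [pvF, ha, hb, hdi]
          intro h
          exact absurd ⟨hdd, h⟩ hd'
        · have hdc2 : d ≠ c := by
            intro hx
            apply hdc
            refine ⟨hx, ?_⟩
            intro hy
            exact hdi (by omega)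
          have hdim : d * i ≠ m := by
            intro he
            apply hdc2
            have : i * d = i * c := by rw [mul_comm i d, he, hc]
            exact Nat.eq_of_mul_eq_mul_left hi0 this
          have hne1 : ¬ (d = i) := hdi
          have hne2 : ¬ (d = c ∧ c ≠ i) := hdc
          rw [pvF_succ hm hd hdi hdim]
          simp [hne1, hne2]
    rw [Finset.sum_congr rfl key, Finset.sum_add_distrib, Finset.sum_add_distrib]
    have s1 : (∑ d ∈ m.divisors, if d = i then i else 0) = i := by
      rw [Finset.sum_ite_eq' m.divisors i (fun _ => i)]
      simp [Nat.mem_divisors, hm0]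
      exact fun h => absurd ⟨c, hc⟩ h
    have s2 : (∑ d ∈ m.divisors, if d = c ∧ c ≠ i then c else 0)
        = (if c ≠ i then c else 0) := by
      by_cases hci : c = i
      · simp [hci]
      · have : ∀ d, (if d = c ∧ c ≠ i then c else 0) = (if d = c then c else 0) := by
          intro d; by_cases h : d = c <;> simp [h, hci]
        simp only [this]
        rw [Finset.sum_ite_eq' m.divisors c (fun _ => c)]
        have : c ∈ m.divisors := Nat.mem_divisors.mpr ⟨⟨i, by rw [hc, mul_comm]⟩, hm0⟩
        simp [this, hci]
    rw [s1, s2, hmod, hdivc]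
    simp
  · have hmod : m % i ≠ 0 := fun h => hdvd (Nat.dvd_iff_mod_eq_zero.mpr h)
    rw [if_neg hmod, zero_add]
    apply Finset.sum_congr rfl
    intro d hdm
    have hd : d ∣ m := (Nat.mem_divisors.mp hdm).1
    have hdi : d ≠ i := by rintro rfl; exact hdvd hd
    have hdim : d * i ≠ m := by
      intro he
      exact hdvd ⟨d, by rw [← he, mul_comm]⟩
    exact pvF_succ hm hd hdi hdim

lemma pvLoop_eq (m : ℕ) (hm : 1 ≤ m) (j : ℕ) (hj : 1 ≤ j) (s : Int) :
    pvAltLoop (m : Int) (j : Int) s = s + ((∑ d ∈ m.divisors, pvF m j d : ℕ) : Int) := by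
  rw [pvAltLoop]
  by_cases h : j * j ≤ m
  · have hc : ((j : Int) * (j : Int) ≤ (m : Int)) := by exact_mod_cast h
    rw [if_pos hc]
    have hrec := pvLoop_eq m hm (j + 1) (by omega)
    have hcast : ((j : Int) + 1) = ((j + 1 : ℕ) : Int) := by push_cast; ring
    rw [hcast]
    by_cases hmod : m % j = 0
    · have hmodc : (PySem.Int.mod (m : Int) (j : Int) == 0) = true := by
        simp [PySem.Int.mod_natCast, hmod]
      have hfd : PySem.Int.floordiv (m : Int) (j : Int) = ((m / j : ℕ) : Int) := by
        simp [PySem.Int.floordiv_natCast]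
      rw [hmodc]
      simp only [if_true]
      rw [pvF_step hm hj h, hmod]
      by_cases hne : m / j = j
      · have : (PySem.Int.floordiv (m : Int) (j : Int) != (j : Int)) = false := by
          simp [hfd, hne]
        rw [this]
        simp only [Bool.false_eq_true, if_false]
        rw [hrec (s + j)]
        simp [hne]
        ring
      · have : (PySem.Int.floordiv (m : Int) (j : Int) != (j : Int)) = true := by
          simp [hfd]
          exact_mod_cast hne
        rw [this]
        simp only [if_true]
        rw [hfd, hrec]
        simp [hne]
        ring
    · have hmodc : (PySem.Int.mod (m : Int) (j : Int) == 0) = false := by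
        simp [PySem.Int.mod_natCast]
        intro hdd
        exact hmod (Nat.dvd_iff_mod_eq_zero.mp (Int.natCast_dvd_natCast.mp hdd))
      rw [hmodc]
      simp only [Bool.false_eq_true, if_false]
      rw [pvF_step hm hj h, if_neg hmod, zero_add, hrec]
  · have hc : ¬ ((j : Int) * (j : Int) ≤ (m : Int)) := by exact_mod_cast h
    rw [if_neg hc]
    have hz : ∑ d ∈ m.divisors, pvF m j d = 0 :=
      Finset.sum_eq_zero (fun d hd => pvF_base (by omega) (Nat.mem_divisors.mp hd).1 hm)
    simp [hz]
termination_by m + 1 - j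
decreasing_by
  have : j ≤ j * j := Nat.le_mul_of_pos_left j hj
  omega

lemma pvTwo (m : ℕ) (hm : 2 ≤ m) :
    1 + ∑ d ∈ m.divisors, pvF m 2 d = ∑ d ∈ m.properDivisors, d := by
  have hm0 : m ≠ 0 := by omega
  have h1m : (1 : ℕ) ∈ m.divisors := Nat.one_mem_divisors.mpr hm0
  have hmm : m ∈ m.divisors := Nat.mem_divisors_self m hm0
  have key : ∀ d ∈ m.divisors,
      d = pvF m 2 d + ((if d = 1 then 1 else 0) + (if d = m then m else 0)) := by
    intro d hdm
    have hd : d ∣ m := (Nat.mem_divisors.mp hdm).1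
    have hd0 : 0 < d := Nat.pos_of_dvd_of_pos hd (by omega)
    by_cases h1 : d = 1
    · subst h1
      have : ¬ m < 1 * 1 := by omega
      simp [pvF, this, hm0]
      omega
    · by_cases h2 : d = m
      · subst h2
        have ha : ¬ (2 ≤ d ∧ d * d ≤ d) := by rintro ⟨x, y⟩; nlinarith
        simp [pvF, ha, h1]
        omega
      · have hdm' : d < m := lt_of_le_of_ne (Nat.le_of_dvd (by omega) hd) h2
        have h2d : 2 ≤ d := by omega
        obtain ⟨e, he⟩ := hd
        have he2 : 2 ≤ e := by
          rcases Nat.lt_or_ge e 2 with h | h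
          · interval_cases e <;> omega
          · exact h
        have hd2 : d * 2 ≤ m := by
          calc d * 2 ≤ d * e := Nat.mul_le_mul_left d he2
          _ = m := he.symm
        rcases Nat.lt_or_ge m (d * d) with hdd | hdd
        · have hy : ¬ (2 ≤ d ∧ d * d ≤ m) := by omega
          simp [pvF, hy, hdd, hd2, h1, h2]
        · have hx : ¬ (m < d * d ∧ d * 2 ≤ m) := by omega
          simp [pvF, h2d, hdd, hx, h1, h2]
  have hsum : ∑ d ∈ m.divisors, d
      = (∑ d ∈ m.divisors, pvF m 2 d) + (1 + m) := by
    rw [Finset.sum_congr rfl key, Finset.sum_add_distrib, Finset.sum_add_distrib]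
    rw [Finset.sum_ite_eq' m.divisors 1 (fun _ => 1), Finset.sum_ite_eq' m.divisors m (fun _ => m)]
    simp [h1m, hmm]
  have hps := Nat.sum_divisors_eq_sum_properDivisors_add_self (n := m)
  omega

lemma pvAsum_aux (m : ℕ) (hm : 1 ≤ m) (t : ℕ) :
    ((PySem.List.pyRange 1 (t : Int) 1).filter
      (fun k => PySem.Int.mod (m : Int) k == 0)).sum
      = ((∑ d ∈ (Finset.range t).filter (· ∣ m), d : ℕ) : Int) := by
  induction t with
  | zero =>
    rw [PySem.List.pyRange_one_eq_nil (by norm_num)]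
    simp
  | succ t ih =>
    rcases Nat.eq_zero_or_pos t with rfl | ht
    · rw [show ((0 + 1 : ℕ) : Int) = 1 by norm_num, PySem.List.pyRange_one_eq_nil (by norm_num)]
      have hz : ¬ (0 ∣ m) := by intro h; rw [Nat.zero_dvd] at h; omega
      simp [Finset.range_one]
      simp [Finset.filter_singleton, hz]
    · have hcast : ((t + 1 : ℕ) : Int) = ((t : ℕ) : Int) + 1 := by push_cast; ring
      rw [hcast, PySem.List.pyRange_one_succ_right (by exact_mod_cast ht), List.filter_append,
        List.sum_append, ih]
      rw [Finset.range_add_one, Finset.filter_insert]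
      by_cases hdvd : t ∣ m
      · have hmodc : (PySem.Int.mod (m : Int) (t : Int) == 0) = true := by
          have : m % t = 0 := Nat.dvd_iff_mod_eq_zero.mp hdvd
          simp [PySem.Int.mod_natCast, this]
        have hnotin : t ∉ (Finset.range t).filter (· ∣ m) := by simp
        rw [if_pos hdvd, Finset.sum_insert hnotin]
        simp [Int.natCast_dvd_natCast, hdvd]
        ring
      · have hmodc : (PySem.Int.mod (m : Int) (t : Int) == 0) = false := by
          simp [PySem.Int.mod_natCast]
          intro hdd
          exact hdvd (Int.natCast_dvd_natCast.mp hdd)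
        rw [if_neg hdvd]
        simp [Int.natCast_dvd_natCast, hdvd]

lemma pvAsum (m : ℕ) (hm : 1 ≤ m) :
    ((PySem.List.pyRange 1 (m : Int) 1).filter
      (fun k => PySem.Int.mod (m : Int) k == 0)).sum
      = ((∑ d ∈ m.properDivisors, d : ℕ) : Int) := by
  rw [pvAsum_aux m hm m]
  congr 1
  apply Finset.sum_congr _ (fun _ _ => rfl)
  ext d
  simp [Nat.mem_properDivisors, Finset.mem_filter, Finset.mem_range, and_comm]

lemma pvPoint (n : Int) : pvDoskonala n = pvIsPerfectAlt n := by
  unfold pvDoskonala pvIsPerfectAlt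
  by_cases hn : n > 0
  · rw [if_pos hn, if_pos hn]
    lift n to ℕ using (le_of_lt hn) with m
    have hm : 1 ≤ m := by exact_mod_cast hn
    by_cases h1 : m = 1
    · subst h1
      rw [PySem.List.pyRange_one_eq_nil (by norm_num)]
      simp
    · have hm2 : 2 ≤ m := by omega
      have hne1 : ((m : Int) == 1) = false := by
        simp
        omega
      rw [hne1]
      simp only [Bool.false_eq_true, if_false]
      have h2 : ((2 : Int)) = ((2 : ℕ) : Int) := by norm_num
      have hloop : pvAltLoop (m : Int) 2 1 = 1 + ((∑ d ∈ m.divisors, pvF m 2 d : ℕ) : Int) := by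
        rw [h2, pvLoop_eq m hm 2 (by omega) 1]
      rw [pvAsum m hm, hloop]
      have : (1 : Int) + ((∑ d ∈ m.divisors, pvF m 2 d : ℕ) : Int)
          = ((∑ d ∈ m.properDivisors, d : ℕ) : Int) := by
        rw [← pvTwo m hm2]
        push_cast
        ring
      rw [this]
  · rw [if_neg hn, if_neg hn]

lemma pvGen (seq : List Int) : gen2 seq = gen2_alt seq := by
  unfold gen2 gen2_alt
  exact List.filter_congr (fun x _ => pvPoint x)

-- ===== VERDICT (by name: the statement is the Claim_ definition above) =====
theorem gen2_spec : Claim_equal_gen2 := by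
  intro seq _
  unfold Spec_gen2
  exact pvGen seq
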